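-- pv_equiv track=rewrite | github.com/taxmybrain/taxmybrain | taxmybrain/main/views.py | periodkey_valid
-- ===== SOURCE A (Python) =====
-- import string
--
-- def periodkey_valid(periodkey):
--     # periodkey must be a string of 4 alphanumeric characters and occasionally
--     # a '#' symbol
--     if not isinstance(periodkey, str):
--         return False
--     if len(periodkey) != 4:
--         return False
--     validset = set(string.ascii_letters + string.digits + '#')
--     periodkey_valid = all([l in validset for l in periodkey])
--     return periodkey_valid
-- ===== SOURCE B (Python) =====
-- import re
--
-- _PERIODKEY_RE = re.compile(r'[A-Za-z0-9#]{4}')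
--
-- def periodkey_valid(periodkey):
--     if not isinstance(periodkey, str):
--         return False
--     return _PERIODKEY_RE.fullmatch(periodkey) is not None
-- ===== Notes on version B (the rewrite author's own statement) =====
-- stated objective: idiomatic
-- what changed: Replaces the explicit length guard plus per-character set-membership comprehension over a built character set with a single anchored regular-expression fullmatch that checks length and charset in one pass.
import Mathlib
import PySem

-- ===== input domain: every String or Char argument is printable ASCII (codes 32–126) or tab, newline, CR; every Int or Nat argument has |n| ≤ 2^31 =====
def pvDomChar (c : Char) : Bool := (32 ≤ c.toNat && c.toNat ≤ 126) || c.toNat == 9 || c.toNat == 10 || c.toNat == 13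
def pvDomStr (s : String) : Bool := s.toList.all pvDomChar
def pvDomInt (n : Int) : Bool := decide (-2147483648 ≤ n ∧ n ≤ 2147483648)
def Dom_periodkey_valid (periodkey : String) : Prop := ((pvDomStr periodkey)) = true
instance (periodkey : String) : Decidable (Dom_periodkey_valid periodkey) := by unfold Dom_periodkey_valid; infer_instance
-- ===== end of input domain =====

-- B replaces A's explicit length guard plus per-character set-membership comprehension with one
-- anchored regular-expression fullmatch (objective: idiomatic). Since the Lean argument is a String,
-- Python's isinstance(periodkey, str) guard is always satisfied and drops out of both ports.

-- ===== PORT A =====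
-- string.ascii_letters + string.digits + '#'
def pvValidChars : List Char :=
  "abcdefghijklmnopqrstuvwxyzABCDEFGHIJKLMNOPQRSTUVWXYZ0123456789#".toList

def periodkey_valid (periodkey : String) : Bool :=
  if PySem.Str.len periodkey ≠ 4 then false
  else
    let validset : PySem.Set Char := PySem.Set.ofList pvValidChars
    (periodkey.toList.map (fun l => PySem.Set.contains validset l)).all id

-- ===== PORT B =====
-- hand port of re.fullmatch(r'[A-Za-z0-9#]{4}', s): exact on all strings — the character class
-- [A-Za-z0-9#] is the range/literal test below, and {4} anchored as fullmatch is the length test.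
def pvReClass (c : Char) : Bool :=
  ('A' ≤ c && c ≤ 'Z') || ('a' ≤ c && c ≤ 'z') || ('0' ≤ c && c ≤ '9') || c == '#'

def periodkey_valid_alt (periodkey : String) : Bool :=
  PySem.Str.len periodkey == 4 && periodkey.toList.all pvReClass

-- ===== PRECONDITION & SPEC =====
def Spec_periodkey_valid (periodkey : String) (out : Bool) : Prop := out = periodkey_valid_alt periodkey
instance (periodkey : String) (out : Bool) : Decidable (Spec_periodkey_valid periodkey out) := by unfold Spec_periodkey_valid; infer_instance

-- ===== CLAIM (what is proved, stated in full; the proofs are below) =====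
def Claim_equal_periodkey_valid : Prop := ∀ (periodkey : String), Dom_periodkey_valid periodkey → Spec_periodkey_valid periodkey (periodkey_valid periodkey)

-- ===== LEMMAS AND PROOFS =====

theorem pvOfNat_toNat (c : Char) : Char.ofNat c.toNat = c := by
  have h : Nat.isValidChar c.toNat := c.valid
  simp [Char.ofNat, h, Char.ofNatAux]
  exact Char.ext (by simp only [Char.toNat]; exact UInt32.ofNatLT_toNat _)

-- set-membership in A's validset agrees with B's character class, for every char code < 128
set_option maxRecDepth 4096 in
theorem pvClass_eq_fin : ∀ n : Fin 128,
    PySem.Set.contains (PySem.Set.ofList pvValidChars) (Char.ofNat n) = pvReClass (Char.ofNat n) := by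
  decide

theorem pvClass_eq (c : Char) (h : pvDomChar c = true) :
    PySem.Set.contains (PySem.Set.ofList pvValidChars) c = pvReClass c := by
  have hlt : c.toNat < 128 := by
    simp [pvDomChar] at h
    omega
  have := pvClass_eq_fin ⟨c.toNat, hlt⟩
  simpa [pvOfNat_toNat] using this

theorem pvAllEq (l : List Char) (h : ∀ c ∈ l, pvDomChar c = true) :
    (l.map (fun c => PySem.Set.contains (PySem.Set.ofList pvValidChars) c)).all id
      = l.all pvReClass := by
  induction l with
  | nil => rfl
  | cons c cs ih =>
      simp only [List.map_cons, List.all_cons, id]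
      rw [pvClass_eq c (h c (by simp)), ih (fun x hx => h x (by simp [hx]))]

-- ===== VERDICT (by name: the statement is the Claim_ definition above) =====
theorem periodkey_valid_spec : Claim_equal_periodkey_valid := by
  intro s hdom
  unfold Spec_periodkey_valid periodkey_valid periodkey_valid_alt
  simp only [Dom_periodkey_valid, pvDomStr, List.all_eq_true] at hdom
  by_cases hlen : PySem.Str.len s = 4
  · simp only [hlen, if_neg (by omega : ¬ (4 : Int) ≠ 4), beq_self_eq_true, Bool.true_and]
    exact pvAllEq s.toList hdom
  · rw [if_pos hlen, beq_eq_false_iff_ne.mpr hlen, Bool.false_and]
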